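-- pv_equiv track=rewrite | github.com/AngelicaDiazB14/CLASESP. | clase 1 intro.py | multiplicarDigitosPares_aux
-- ===== SOURCE A (Python) =====
-- def multiplicarDigitosPares_aux(n):
--     if(n == 0):
--         return 1
--     elif((n%2) == 0):
--         if((n%10) != 0):
--             return (n%10) * multiplicarDigitosPares_aux(n // 10)  # n%10 obtengo el úñtimo dígito del número, n//10 quita el último dígito del número
--         else:
--             return multiplicarDigitosPares_aux(n // 10)
--     else:
--             return multiplicarDigitosPares_aux(n // 10)
-- ===== SOURCE B (Python) =====
-- def multiplicarDigitosPares_aux(n):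
--     product = 1
--     while n != 0:
--         d = n % 10
--         if d % 2 == 0 and d != 0:
--             product *= d
--         n = n // 10
--     return product
-- ===== Notes on version B (the rewrite author's own statement) =====
-- stated objective: idiomatic
-- what changed: Replaces the three-branch recursion with an iterative while loop over the digits carrying a product accumulator.
import Mathlib
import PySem

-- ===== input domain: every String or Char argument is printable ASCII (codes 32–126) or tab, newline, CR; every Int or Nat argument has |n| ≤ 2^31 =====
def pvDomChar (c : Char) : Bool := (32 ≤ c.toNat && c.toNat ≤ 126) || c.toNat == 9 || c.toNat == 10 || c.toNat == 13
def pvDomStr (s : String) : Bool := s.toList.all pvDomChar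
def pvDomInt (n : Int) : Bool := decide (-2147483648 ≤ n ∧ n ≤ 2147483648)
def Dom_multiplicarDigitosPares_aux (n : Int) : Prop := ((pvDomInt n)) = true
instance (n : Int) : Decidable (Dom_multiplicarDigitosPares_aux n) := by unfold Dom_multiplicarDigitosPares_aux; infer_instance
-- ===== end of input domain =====

-- B changes the recursive digit walk into an iterative accumulator loop; equivalence is claimed for 0 ≤ n (A raises RecursionError on negative n).

-- ===== PORT A =====
-- Literal port of A's recursion; the 'n < 0' guard only makes the recursion total
-- (Python A never returns on negative n: it recurses forever / raises RecursionError).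
def multiplicarDigitosPares_aux (n : Int) : Int :=
  if n < 0 then 0
  else if n = 0 then 1
  else if PySem.Int.mod n 2 = 0 then
    if PySem.Int.mod n 10 ≠ 0 then
      (PySem.Int.mod n 10) * multiplicarDigitosPares_aux (PySem.Int.floordiv n 10)
    else
      multiplicarDigitosPares_aux (PySem.Int.floordiv n 10)
  else
    multiplicarDigitosPares_aux (PySem.Int.floordiv n 10)
termination_by n.toNat
decreasing_by
  all_goals
    rw [PySem.Int.floordiv_eq_ediv_of_pos (by omega)]
    omega

-- ===== PORT B =====
-- the while loop of Source B; the guard is 'n > 0' instead of 'n ≠ 0' only to make it total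
-- (Python B loops forever on negative n, which Pre_ excludes).
def pvLoopB (n product : Int) : Int :=
  if n ≤ 0 then product
  else
    pvLoopB (PySem.Int.floordiv n 10)
      (if PySem.Int.mod (PySem.Int.mod n 10) 2 = 0 ∧ PySem.Int.mod n 10 ≠ 0 then
        product * PySem.Int.mod n 10 else product)
termination_by n.toNat
decreasing_by
  rw [PySem.Int.floordiv_eq_ediv_of_pos (by omega)]
  omega

def multiplicarDigitosPares_aux_alt (n : Int) : Int := pvLoopB n 1

-- ===== PRECONDITION & SPEC =====
-- Pre_ excludes negative n, on which Python A raises RecursionError (and Python B loops forever); A returns on no excluded input.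
def Pre_multiplicarDigitosPares_aux (n : Int) : Prop := 0 ≤ n
instance (n : Int) : Decidable (Pre_multiplicarDigitosPares_aux n) := by unfold Pre_multiplicarDigitosPares_aux; infer_instance
def pvWitness_multiplicarDigitosPares_aux : Int := 2468

def Spec_multiplicarDigitosPares_aux (n : Int) (out : Int) : Prop := out = multiplicarDigitosPares_aux_alt n
instance (n : Int) (out : Int) : Decidable (Spec_multiplicarDigitosPares_aux n out) := by unfold Spec_multiplicarDigitosPares_aux; infer_instance

-- ===== CLAIM (what is proved, stated in full; the proofs are below) =====
def Claim_equal_multiplicarDigitosPares_aux : Prop := ∀ (n : Int), Dom_multiplicarDigitosPares_aux n → Pre_multiplicarDigitosPares_aux n → Spec_multiplicarDigitosPares_aux n (multiplicarDigitosPares_aux n)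

-- ===== LEMMAS AND PROOFS =====

-- loop invariant: the accumulator factors out of B's loop
theorem pvLoopB_eq_mul_aux (k : Nat) : ∀ (n : Int), 0 ≤ n → n.toNat = k → ∀ (p : Int),
    pvLoopB n p = p * multiplicarDigitosPares_aux n := by
  induction k using Nat.strong_induction_on with
  | _ k ih => ?_
  intro n hn hk p
  by_cases h0 : n = 0
  · subst h0
    rw [pvLoopB, multiplicarDigitosPares_aux]
    norm_num
  · have hpos : 0 < n := by omega
    have hq : 0 ≤ PySem.Int.floordiv n 10 ∧ PySem.Int.floordiv n 10 < n := by
      rw [PySem.Int.floordiv_eq_ediv_of_pos (by omega)]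
      constructor <;> omega
    rw [pvLoopB, multiplicarDigitosPares_aux]
    rw [if_neg (by omega : ¬ n ≤ 0), if_neg (by omega : ¬ n < 0), if_neg h0]
    have hm2 : PySem.Int.mod (PySem.Int.mod n 10) 2 = 0 ↔ PySem.Int.mod n 2 = 0 := by
      rw [PySem.Int.mod_eq_emod_of_pos (by omega), PySem.Int.mod_eq_emod_of_pos (by omega),
        PySem.Int.mod_eq_emod_of_pos (by omega)]
      omega
    have hrec := ih (PySem.Int.floordiv n 10).toNat (by omega) _ hq.1 rfl
    by_cases he : PySem.Int.mod n 2 = 0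
    · rw [if_pos he]
      by_cases hd : PySem.Int.mod n 10 = 0
      · rw [if_neg (fun h => h.2 hd), if_neg (not_not_intro hd), hrec]
      · rw [if_pos (by exact ⟨hm2.mpr he, hd⟩), if_pos (by exact hd), hrec]
        ring
    · rw [if_neg he, if_neg (fun h => he (hm2.mp h.1)), hrec]

-- ===== VERDICT (by name: the statement is the Claim_ definition above) =====
theorem multiplicarDigitosPares_aux_spec : Claim_equal_multiplicarDigitosPares_aux := by
  intro n _ hpre
  unfold Spec_multiplicarDigitosPares_aux multiplicarDigitosPares_aux_alt
  rw [pvLoopB_eq_mul_aux n.toNat n hpre rfl 1, one_mul]
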